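-- pv_equiv track=rewrite | github.com/GlebSolovev/test-utbot-python | beginners/others.py | calculateDivisors
-- ===== SOURCE A (Python) =====
-- import math
--
-- def calculateDivisors(A, B):
--     N = A - B
--     noOfDivisors = 0
--
--     a = math.sqrt(N)
--     for i in range(1, int(a + 1)):
--         # if N is divisible by i
--         if ((N % i == 0)):
--             # count only the divisors greater than B
--             if (i > B):
--                 noOfDivisors += 1
--
--             # checking if a divisor isnot counted twice
--             if ((N / i) != i and (N / i) > B):
--                 noOfDivisors += 1
--
--     return noOfDivisors
-- ===== SOURCE B (Python) =====
-- import math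
--
--
-- def calculateDivisors(A, B):
--     N = A - B
--     small = []
--     large = []
--     for i in range(1, math.isqrt(N) + 1):
--         if N % i == 0:
--             small.append(i)
--             if i != N // i:
--                 large.append(N // i)
--     divisors = small + large[::-1]
--     count = 0
--     while divisors and divisors[-1] > B:
--         divisors.pop()
--         count += 1
--     return count
-- ===== Notes on version B (the rewrite author's own statement) =====
-- stated objective: alternative
-- what changed: B materializes the sorted divisor list of A-B (math.isqrt pairing into a small-half and a reversed large-half) and then counts the trailing divisors by popping from the end while the last one exceeds B, instead of A's on-the-fly conditional counting with a float sqrt bound and float cofactor comparisons.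
import Mathlib
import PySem

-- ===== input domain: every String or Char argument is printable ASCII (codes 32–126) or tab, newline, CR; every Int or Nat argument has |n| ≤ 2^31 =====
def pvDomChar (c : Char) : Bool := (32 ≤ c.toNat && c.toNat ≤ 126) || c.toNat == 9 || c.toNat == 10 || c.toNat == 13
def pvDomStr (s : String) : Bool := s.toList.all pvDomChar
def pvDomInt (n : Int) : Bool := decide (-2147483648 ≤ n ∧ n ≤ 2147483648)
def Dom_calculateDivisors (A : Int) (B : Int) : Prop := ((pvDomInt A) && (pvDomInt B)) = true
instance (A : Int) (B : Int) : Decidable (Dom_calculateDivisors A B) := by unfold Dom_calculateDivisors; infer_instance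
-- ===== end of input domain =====

-- B builds the sorted list of divisors of A-B (isqrt pairing into two halves) and then counts,
-- popping from the end, the trailing divisors greater than B — instead of A's on-the-fly
-- conditional counting with a float-paired cofactor; alternative decomposition, same O(√N) cost.

-- ===== PORT A =====
-- `int(math.sqrt(N) + 1)` equals `Int.sqrt N + 1` exactly for 0 ≤ N ≤ 2^32 (the Dom range,
-- well inside double precision); `math.sqrt` raises ValueError for N < 0, excluded by Pre_.
-- The float `N / i` is only compared when i divides N, where it is the exact integer
-- quotient (≤ 2^32 < 2^53), i.e. `PySem.Int.floordiv N i`.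
def calculateDivisors (A : Int) (B : Int) : Int :=
  let N := A - B
  (PySem.List.pyRange 1 (Int.sqrt N + 1) 1).foldl
    (fun noOfDivisors i =>
      if PySem.Int.mod N i = 0 then
        let n1 := if i > B then noOfDivisors + 1 else noOfDivisors
        if PySem.Int.floordiv N i ≠ i ∧ PySem.Int.floordiv N i > B then n1 + 1 else n1
      else noOfDivisors)
    0

-- ===== PORT B =====
-- the `while divisors and divisors[-1] > B: divisors.pop(); count += 1` loop of Source B
def popCount (B : Int) : List Int → Int → Int
  | [], count => count
  | d :: ds, count =>
      if (d :: ds).getLast (by simp) > B then popCount B (d :: ds).dropLast (count + 1)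
      else count
termination_by l _ => l.length
decreasing_by simp

def calculateDivisors_alt (A : Int) (B : Int) : Int :=
  let N := A - B
  let p := (PySem.List.pyRange 1 (Int.sqrt N + 1) 1).foldl
    (fun (sl : List Int × List Int) i =>
      if PySem.Int.mod N i = 0 then
        let small := sl.1 ++ [i]
        if i ≠ PySem.Int.floordiv N i then (small, sl.2 ++ [PySem.Int.floordiv N i])
        else (small, sl.2)
      else sl)
    ([], [])
  let divisors := p.1 ++ p.2.reverse
  popCount B divisors 0

-- ===== PRECONDITION & SPEC =====
-- Pre_ excludes exactly the inputs with A - B < 0, where A raises ValueError (math.sqrt of a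
-- negative number); B's math.isqrt raises there as well.
def Pre_calculateDivisors (A : Int) (B : Int) : Prop := 0 ≤ A - B
instance (A : Int) (B : Int) : Decidable (Pre_calculateDivisors A B) := by unfold Pre_calculateDivisors; infer_instance
def pvWitness_calculateDivisors : Int × Int := (10, 2)

def Spec_calculateDivisors (A : Int) (B : Int) (out : Int) : Prop := out = calculateDivisors_alt A B
instance (A : Int) (B : Int) (out : Int) : Decidable (Spec_calculateDivisors A B out) := by unfold Spec_calculateDivisors; infer_instance

-- ===== CLAIM (what is proved, stated in full; the proofs are below) =====
def Claim_equal_calculateDivisors : Prop := ∀ (A : Int) (B : Int), Dom_calculateDivisors A B → Pre_calculateDivisors A B → Spec_calculateDivisors A B (calculateDivisors A B)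

-- ===== LEMMAS AND PROOFS =====

-- A's loop is a pair of counts over the range
theorem foldA_count (N B : Int) (L : List Int) (c : Int) :
    L.foldl
      (fun noOfDivisors i =>
        if PySem.Int.mod N i = 0 then
          let n1 := if i > B then noOfDivisors + 1 else noOfDivisors
          if PySem.Int.floordiv N i ≠ i ∧ PySem.Int.floordiv N i > B then n1 + 1 else n1
        else noOfDivisors)
      c
    = c + (L.countP (fun i => decide (PySem.Int.mod N i = 0 ∧ i > B)) : Int)
        + (L.countP (fun i => decide (PySem.Int.mod N i = 0 ∧
            (PySem.Int.floordiv N i ≠ i ∧ PySem.Int.floordiv N i > B))) : Int) := by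
  induction L generalizing c with
  | nil => simp
  | cons a L ih =>
    simp only [List.foldl_cons, List.countP_cons, ih]
    by_cases h1 : PySem.Int.mod N a = 0 <;>
      by_cases h2 : a > B <;>
      by_cases h3 : PySem.Int.floordiv N a ≠ a ∧ PySem.Int.floordiv N a > B <;>
      simp [h1, h2, h3] <;> omega

-- B's loop accumulates the small divisors and the large cofactors
theorem foldB_acc (N : Int) (L : List Int) (s0 l0 : List Int) :
    L.foldl
      (fun (sl : List Int × List Int) i =>
        if PySem.Int.mod N i = 0 then
          let small := sl.1 ++ [i]
          if i ≠ PySem.Int.floordiv N i then (small, sl.2 ++ [PySem.Int.floordiv N i])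
          else (small, sl.2)
        else sl)
      (s0, l0)
    = (s0 ++ L.filter (fun i => decide (PySem.Int.mod N i = 0)),
       l0 ++ (L.filter (fun i => decide (PySem.Int.mod N i = 0 ∧ i ≠ PySem.Int.floordiv N i))).map
          (fun i => PySem.Int.floordiv N i)) := by
  induction L generalizing s0 l0 with
  | nil => simp
  | cons a L ih =>
    by_cases h1 : PySem.Int.mod N a = 0
    · by_cases h2 : a ≠ PySem.Int.floordiv N a
      · have hstep : List.foldl
            (fun (sl : List Int × List Int) i =>
              if PySem.Int.mod N i = 0 then
                let small := sl.1 ++ [i]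
                if i ≠ PySem.Int.floordiv N i then (small, sl.2 ++ [PySem.Int.floordiv N i])
                else (small, sl.2)
              else sl) (s0, l0) (a :: L)
            = List.foldl
            (fun (sl : List Int × List Int) i =>
              if PySem.Int.mod N i = 0 then
                let small := sl.1 ++ [i]
                if i ≠ PySem.Int.floordiv N i then (small, sl.2 ++ [PySem.Int.floordiv N i])
                else (small, sl.2)
              else sl) (s0 ++ [a], l0 ++ [PySem.Int.floordiv N a]) L := by
          simp [h1, h2]
        rw [hstep, ih]
        simp [h1, h2]
      · have hstep : List.foldl
            (fun (sl : List Int × List Int) i =>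
              if PySem.Int.mod N i = 0 then
                let small := sl.1 ++ [i]
                if i ≠ PySem.Int.floordiv N i then (small, sl.2 ++ [PySem.Int.floordiv N i])
                else (small, sl.2)
              else sl) (s0, l0) (a :: L)
            = List.foldl
            (fun (sl : List Int × List Int) i =>
              if PySem.Int.mod N i = 0 then
                let small := sl.1 ++ [i]
                if i ≠ PySem.Int.floordiv N i then (small, sl.2 ++ [PySem.Int.floordiv N i])
                else (small, sl.2)
              else sl) (s0 ++ [a], l0) L := by
          have h2' : a = PySem.Int.floordiv N a := not_ne_iff.mp h2
          simp [h1, ← h2']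
        rw [hstep, ih]
        simp [h1, h2]
    · have hstep : List.foldl
          (fun (sl : List Int × List Int) i =>
            if PySem.Int.mod N i = 0 then
              let small := sl.1 ++ [i]
              if i ≠ PySem.Int.floordiv N i then (small, sl.2 ++ [PySem.Int.floordiv N i])
              else (small, sl.2)
            else sl) (s0, l0) (a :: L)
          = List.foldl
          (fun (sl : List Int × List Int) i =>
            if PySem.Int.mod N i = 0 then
              let small := sl.1 ++ [i]
              if i ≠ PySem.Int.floordiv N i then (small, sl.2 ++ [PySem.Int.floordiv N i])
              else (small, sl.2)
            else sl) (s0, l0) L := by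
        simp [h1]
      rw [hstep, ih]
      simp [h1]

theorem popCount_append (B d : Int) (ds : List Int) (c : Int) :
    popCount B (ds ++ [d]) c = if d > B then popCount B ds (c + 1) else c := by
  cases ds with
  | nil => simp [popCount]
  | cons a as =>
    rw [List.cons_append, popCount]
    have hdl : (a :: (as ++ [d])).dropLast = a :: as := by
      rw [← List.cons_append, List.dropLast_concat]
    simp [hdl]

-- popping while the last element exceeds B counts all elements > B, on a sorted list
theorem popCount_sorted (B : Int) (ds : List Int) (h : ds.Pairwise (· ≤ ·)) (c : Int) :
    popCount B ds c = c + (ds.countP (fun x => decide (x > B)) : Int) := by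
  induction ds using List.reverseRecOn generalizing c with
  | nil => simp [popCount]
  | append_singleton ds d ih =>
    rw [popCount_append]
    rcases List.pairwise_append.mp h with ⟨hds, -, hcross⟩
    by_cases hd : d > B
    · rw [if_pos hd, ih hds]
      simp [List.countP_append, hd]
      ring
    · rw [if_neg hd]
      have hz : (ds ++ [d]).countP (fun x => decide (x > B)) = 0 := by
        rw [List.countP_eq_zero]
        intro x hx
        rcases List.mem_append.mp hx with hx | hx
        · have : x ≤ d := hcross x hx d (by simp)
          simp; omega
        · simp at hx; subst hx; simp; omega
      rw [hz]; simp

-- arithmetic facts about the square-root bound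
theorem sqrt_sq_le (N : Int) (h : 0 ≤ N) : Int.sqrt N * Int.sqrt N ≤ N := by
  obtain ⟨n, rfl⟩ : ∃ n : ℕ, N = (n : Int) := ⟨N.toNat, (Int.toNat_of_nonneg h).symm⟩
  rw [Int.sqrt_natCast, ← pow_two]
  exact_mod_cast Nat.sqrt_le' n

-- a paired cofactor of a small divisor that differs from it lies strictly above the root
theorem big_cofactor (N i : Int) (hN : 0 ≤ N) (hi1 : 1 ≤ i) (his : i ≤ Int.sqrt N)
    (hdvd : i ∣ N) (hne : i ≠ N / i) : Int.sqrt N < N / i := by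
  set s := Int.sqrt N with hs
  have hs0 : 0 ≤ s := Int.sqrt_nonneg N
  have hmul : i * (N / i) = N := Int.mul_ediv_cancel' hdvd
  have hsq : s * s ≤ N := sqrt_sq_le N hN
  by_contra hq
  rw [not_lt] at hq
  -- then i * (N/i) ≤ s * s ≤ N, so everything is tight and i = N / i
  have hq1 : 1 ≤ N / i := by nlinarith
  have h1 : i * (N / i) ≤ i * s := by nlinarith
  have h2 : i * s ≤ s * s := by nlinarith
  have his' : i = s := by nlinarith
  have : N / i = s := by nlinarith
  exact hne (by omega)

-- monotonicity of cofactors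
theorem cofactor_anti (N i j : Int) (hN : 0 ≤ N) (hi1 : 1 ≤ i) (hj1 : 1 ≤ j)
    (hij : i < j) (hdi : i ∣ N) (hdj : j ∣ N) : N / j ≤ N / i := by
  have hmi : i * (N / i) = N := Int.mul_ediv_cancel' hdi
  have hmj : j * (N / j) = N := Int.mul_ediv_cancel' hdj
  have h0i : 0 ≤ N / i := Int.ediv_nonneg hN (by omega)
  have h0j : 0 ≤ N / j := Int.ediv_nonneg hN (by omega)
  nlinarith

-- the assembled divisor list is sorted
theorem divisors_sorted (N : Int) (hN : 0 ≤ N) :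
    ((PySem.List.pyRange 1 (Int.sqrt N + 1) 1).filter (fun i => decide (PySem.Int.mod N i = 0)) ++
     (((PySem.List.pyRange 1 (Int.sqrt N + 1) 1).filter
         (fun i => decide (PySem.Int.mod N i = 0 ∧ i ≠ PySem.Int.floordiv N i))).map
        (fun i => PySem.Int.floordiv N i)).reverse).Pairwise (· ≤ ·) := by
  have hrange : (PySem.List.pyRange 1 (Int.sqrt N + 1) 1).Pairwise (· < ·) :=
    PySem.List.pairwise_lt_pyRange_one 1 (Int.sqrt N + 1)
  apply List.pairwise_append.mpr
  refine ⟨?_, ?_, ?_⟩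
  · exact (List.Pairwise.sublist List.filter_sublist hrange).imp le_of_lt
  · rw [List.pairwise_reverse, List.pairwise_map]
    apply List.Pairwise.imp_of_mem ?_
      (List.Pairwise.sublist List.filter_sublist hrange)
    intro i j hi hj hij
    have hi' := List.of_mem_filter hi
    have hj' := List.of_mem_filter hj
    simp only [decide_eq_true_eq] at hi' hj'
    have hiL := PySem.List.mem_pyRange_one.mp (List.mem_of_mem_filter hi)
    have hjL := PySem.List.mem_pyRange_one.mp (List.mem_of_mem_filter hj)
    rw [PySem.Int.floordiv_eq_ediv_of_pos (by omega), PySem.Int.floordiv_eq_ediv_of_pos (by omega)]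
    exact cofactor_anti N i j hN (by omega) (by omega) hij
      ((PySem.Int.mod_eq_zero_iff_dvd N i).mp hi'.1)
      ((PySem.Int.mod_eq_zero_iff_dvd N j).mp hj'.1)
  · intro a ha b hb
    have haL := PySem.List.mem_pyRange_one.mp (List.mem_of_mem_filter ha)
    rcases List.mem_map.mp (List.mem_reverse.mp hb) with ⟨i, hi, rfl⟩
    have hi' := List.of_mem_filter hi
    simp only [decide_eq_true_eq] at hi'
    have hiL := PySem.List.mem_pyRange_one.mp (List.mem_of_mem_filter hi)
    have hfd : PySem.Int.floordiv N i = N / i := PySem.Int.floordiv_eq_ediv_of_pos (by omega)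
    rw [hfd]
    have := big_cofactor N i hN (by omega) (by omega)
      ((PySem.Int.mod_eq_zero_iff_dvd N i).mp hi'.1)
      (by rw [← hfd]; exact hi'.2)
    omega

-- ===== VERDICT (by name: the statement is the Claim_ definition above) =====
theorem calculateDivisors_spec : Claim_equal_calculateDivisors := by
  intro A B _ hpre
  unfold Pre_calculateDivisors at hpre
  unfold Spec_calculateDivisors calculateDivisors calculateDivisors_alt
  dsimp only
  rw [foldA_count, foldB_acc]
  dsimp only
  simp only [List.nil_append]
  rw [popCount_sorted B _ (divisors_sorted (A - B) hpre)]
  rw [List.countP_append, List.countP_reverse, List.countP_map, List.countP_filter,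
    List.countP_filter]
  have e1 : ∀ (x : Int), x ∈ PySem.List.pyRange 1 (Int.sqrt (A - B) + 1) 1 →
      ((decide (PySem.Int.mod (A - B) x = 0 ∧ x > B)) = true
      ↔ ((decide (x > B)) && decide (PySem.Int.mod (A - B) x = 0)) = true) := by
    intro x _
    simp only [Bool.and_eq_true, decide_eq_true_eq]
    tauto
  have e2 : ∀ (x : Int), x ∈ PySem.List.pyRange 1 (Int.sqrt (A - B) + 1) 1 →
      ((decide (PySem.Int.mod (A - B) x = 0 ∧
        (PySem.Int.floordiv (A - B) x ≠ x ∧ PySem.Int.floordiv (A - B) x > B))) = true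
      ↔ ((decide (PySem.Int.floordiv (A - B) x > B)) &&
          decide (PySem.Int.mod (A - B) x = 0 ∧ x ≠ PySem.Int.floordiv (A - B) x)) = true) := by
    intro x _
    simp only [Bool.and_eq_true, decide_eq_true_eq]
    constructor
    · rintro ⟨hm, hne, hgt⟩
      exact ⟨hgt, hm, fun h => hne h.symm⟩
    · rintro ⟨hgt, hm, hne⟩
      exact ⟨hm, fun h => hne h.symm, hgt⟩
  rw [List.countP_congr e1, List.countP_congr e2]
  simp only [Function.comp_def]
  push_cast
  ring
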